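-- pv_equiv track=rewrite | github.com/henriksson-lab/minimap2-pure-rs | scripts/parity_matrix.py | sam_core
-- ===== SOURCE A (Python) =====
-- SAM_TAGS = ("RG", "NM", "AS", "ms", "nn", "ts")
--
-- def sam_core(lines: list[str]) -> list[str]:
--     normalized = []
--     for line in lines:
--         if line.startswith("@"):
--             continue
--         fields = line.split("\t")
--         tags = {}
--         for field in fields[11:]:
--             parts = field.split(":", 2)
--             if len(parts) == 3:
--                 tags[parts[0]] = field
--         selected_tags = [tags[tag] for tag in SAM_TAGS if tag in tags]
--         normalized.append("\t".join([*fields[:6], *selected_tags]))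
--     return normalized
-- ===== SOURCE B (Python) =====
-- SAM_TAGS = ("RG", "NM", "AS", "ms", "nn", "ts")
--
-- def sam_core(lines: list[str]) -> list[str]:
--     out = []
--     for line in lines:
--         if line.startswith("@"):
--             continue
--         fields = line.split("\t")
--         selected = []
--         for tag in SAM_TAGS:
--             for field in reversed(fields[11:]):
--                 parts = field.split(":", 2)
--                 if len(parts) == 3 and parts[0] == tag:
--                     selected.append(field)
--                     break
--         out.append("\t".join(fields[:6] + selected))
--     return out
-- ===== Notes on version B (the rewrite author's own statement) =====
-- stated objective: alternative
-- what changed: B drops A's per-line tag dictionary and instead, for each tag in SAM_TAGS order, scans the reversed extra fields for the first match (= the last matching field, reproducing dict-overwrite semantics); trades the index for direct per-tag scans.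
import Mathlib
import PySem

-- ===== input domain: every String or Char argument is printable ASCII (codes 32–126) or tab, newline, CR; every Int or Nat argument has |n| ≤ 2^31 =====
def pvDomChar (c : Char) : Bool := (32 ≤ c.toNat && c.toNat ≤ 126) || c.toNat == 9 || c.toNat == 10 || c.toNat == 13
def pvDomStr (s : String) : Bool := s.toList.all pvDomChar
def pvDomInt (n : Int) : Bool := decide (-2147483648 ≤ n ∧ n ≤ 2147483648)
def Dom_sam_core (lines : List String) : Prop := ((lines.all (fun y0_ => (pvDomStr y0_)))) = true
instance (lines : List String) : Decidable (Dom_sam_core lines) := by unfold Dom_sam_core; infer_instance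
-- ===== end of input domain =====

-- B replaces A's per-line tag dictionary by a direct per-tag backwards scan of fields[11:] (alternative: no intermediate index, same cost).

def pvSamTags : List String := ["RG", "NM", "AS", "ms", "nn", "ts"]

-- ===== PORT A =====
def sam_core (lines : List String) : List String :=
  lines.foldl (fun normalized line =>
    if PySem.Str.startswith line "@" then normalized
    else
      let fields := (PySem.Str.split? line "\t").getD []   -- sep "\t" ≠ "", never none
      let tags : PySem.Dict String String :=
        (PySem.List.slice fields (some 11) none).foldl (fun tags field =>
          if ((PySem.Str.splitMax? field ":" 2).getD []).length = 3   -- parts = field.split(":", 2); sep ":" ≠ "", never none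
          then tags.insert (((PySem.Str.splitMax? field ":" 2).getD []).headD "") field  -- parts[0]: parts ≠ [] when length = 3
          else tags)
          PySem.Dict.empty
      let selected := pvSamTags.filterMap (fun tag => tags.get? tag)  -- [tags[t] for t in SAM_TAGS if t in tags]
      normalized ++ [PySem.Str.join "\t" (PySem.List.slice fields none (some 6) ++ selected)]) []

-- ===== PORT B =====
-- does a field match a tag (field.split(':',2) has length 3 and parts[0] = tag)?
def pvTagMatch (tag field : String) : Bool :=
  let parts := (PySem.Str.splitMax? field ":" 2).getD []   -- sep ":" ≠ "", never none
  if parts.length = 3 then parts.headD "" == tag else false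

def sam_core_alt (lines : List String) : List String :=
  lines.foldl (fun out line =>
    if PySem.Str.startswith line "@" then out
    else
      let fields := (PySem.Str.split? line "\t").getD []   -- sep "\t" ≠ "", never none
      let selected := pvSamTags.filterMap (fun tag =>
        (PySem.List.slice fields (some 11) none).reverse.find? (pvTagMatch tag))  -- first match of reversed = last match
      out ++ [PySem.Str.join "\t" (PySem.List.slice fields none (some 6) ++ selected)]) []

-- ===== PRECONDITION & SPEC =====
def Spec_sam_core (lines : List String) (out : List String) : Prop := out = sam_core_alt lines
instance (lines : List String) (out : List String) : Decidable (Spec_sam_core lines out) := by unfold Spec_sam_core; infer_instance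

-- ===== CLAIM (what is proved, stated in full; the proofs are below) =====
def Claim_equal_sam_core : Prop := ∀ (lines : List String), Dom_sam_core lines → Spec_sam_core lines (sam_core lines)

-- ===== LEMMAS AND PROOFS =====

-- the A-side dict lookup equals B's backwards first-match scan
theorem pv_dict_find (tag : String) (rest : List String) (d0 : PySem.Dict String String) :
    ((rest.foldl (fun tags field =>
        if ((PySem.Str.splitMax? field ":" 2).getD []).length = 3
        then tags.insert (((PySem.Str.splitMax? field ":" 2).getD []).headD "") field
        else tags) d0).get? tag)
      = ((rest.reverse.find? (pvTagMatch tag)).or (d0.get? tag)) := by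
  induction rest using List.reverseRecOn generalizing d0 with
  | nil => simp
  | append_singleton rest f ih =>
      rw [List.foldl_append, List.foldl_cons, List.foldl_nil, List.reverse_append,
        List.reverse_singleton, List.singleton_append]
      by_cases h3 : ((PySem.Str.splitMax? f ":" 2).getD []).length = 3
      · rw [if_pos h3, PySem.Dict.get?_insert]
        by_cases hb : (((PySem.Str.splitMax? f ":" 2).getD []).headD "" == tag) = true
        · have hm : pvTagMatch tag f = true := by
            unfold pvTagMatch; dsimp only; rw [if_pos h3]; exact hb
          rw [List.find?_cons_of_pos (h := hm), if_pos (eq_of_beq hb).symm]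
          simp
        · have hm : ¬ pvTagMatch tag f = true := by
            unfold pvTagMatch; dsimp only; rw [if_pos h3]; exact fun h => hb h
          have hne : ¬ tag = ((PySem.Str.splitMax? f ":" 2).getD []).headD "" :=
            fun h => hb (beq_iff_eq.mpr h.symm)
          rw [List.find?_cons_of_neg (h := hm), if_neg hne, ih]
      · have hm : ¬ pvTagMatch tag f = true := by
          unfold pvTagMatch; dsimp only; rw [if_neg h3]; simp
        rw [if_neg h3, List.find?_cons_of_neg (h := hm), ih]

theorem sam_core_eq (lines : List String) : sam_core lines = sam_core_alt lines := by
  unfold sam_core sam_core_alt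
  apply List.foldl_ext
  intro acc line _
  by_cases h : PySem.Str.startswith line "@" = true
  · simp only [h, if_true]
  · simp only [h, Bool.false_eq_true, if_false, pv_dict_find]
    simp

-- ===== VERDICT (by name: the statement is the Claim_ definition above) =====
theorem sam_core_spec : Claim_equal_sam_core := by
  intro lines _
  unfold Spec_sam_core
  exact sam_core_eq lines
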